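-- pv_equiv track=rewrite | github.com/oicr-gsi/waterzooi | whole_genome.py | identify_deliverables
-- ===== SOURCE A (Python) =====
-- def identify_deliverables(project_info):
--     '''
--     (dict) -> dict
--
--     Returns a dictionary with boolean identicating if analysis pipeline and
--     cbioportal data should be released
--
--     Parameters
--     ----------
--     - project_info (dict): Dictionary with project information
--     '''
--
--     deliverables = project_info['deliverables'].split(',')
--
--     D ={'pipeline': False, 'cbioportal': False}
--     for i in deliverables:
--         if 'pipeline' in i.lower():
--             D['pipeline'] = True
--         if 'cbioportal' in i.lower():
--             D['cbioportal'] = True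
--
--     return D
-- ===== SOURCE B (Python) =====
-- def identify_deliverables(project_info):
--     '''
--     (dict) -> dict
--
--     Returns a dictionary with boolean identicating if analysis pipeline and
--     cbioportal data should be released
--
--     Parameters
--     ----------
--     - project_info (dict): Dictionary with project information
--     '''
--     s = project_info['deliverables'].lower()
--     return {'pipeline': 'pipeline' in s, 'cbioportal': 'cbioportal' in s}
-- ===== Notes on version B (the rewrite author's own statement) =====
-- stated objective: simpler
-- what changed: Drops the comma-split and the per-token update loop: B lowercases the whole deliverables string once and returns the dict literal built from two whole-string substring tests, correct because neither target word can span a comma.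
import Mathlib
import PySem

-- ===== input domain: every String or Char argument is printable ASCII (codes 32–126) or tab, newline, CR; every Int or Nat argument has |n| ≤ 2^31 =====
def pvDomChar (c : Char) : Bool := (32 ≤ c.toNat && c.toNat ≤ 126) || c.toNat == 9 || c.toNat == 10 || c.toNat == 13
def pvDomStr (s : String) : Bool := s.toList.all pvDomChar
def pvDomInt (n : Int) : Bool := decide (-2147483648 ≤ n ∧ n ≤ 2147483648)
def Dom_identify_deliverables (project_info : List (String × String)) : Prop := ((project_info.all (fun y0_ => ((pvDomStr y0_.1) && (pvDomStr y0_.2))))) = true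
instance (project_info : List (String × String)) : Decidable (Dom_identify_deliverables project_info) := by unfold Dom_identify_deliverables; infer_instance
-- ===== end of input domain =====

-- B lowercases the whole deliverables string once and builds the result dict from two
-- whole-string substring tests, dropping A's comma-split and per-token update loop (objective: simpler).


-- ===== PORT A =====
def identify_deliverables (project_info : List (String × String)) : List (String × Bool) :=
  match PySem.Dict.get? (PySem.Dict.mk project_info) "deliverables" with
  | none => []   -- Python raises KeyError here; excluded by Pre_
  | some dv =>
      let deliverables := (PySem.Str.split? dv ",").getD []   -- sep "," is nonempty, so split? is always some
      let D : PySem.Dict String Bool := PySem.Dict.mk [("pipeline", false), ("cbioportal", false)]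
      let D := deliverables.foldl (fun D i =>
          let D := if PySem.Str.isIn "pipeline" (PySem.Str.lower i) then PySem.Dict.insert D "pipeline" true else D
          let D := if PySem.Str.isIn "cbioportal" (PySem.Str.lower i) then PySem.Dict.insert D "cbioportal" true else D
          D) D
      D.items

-- ===== PORT B =====
def identify_deliverables_alt (project_info : List (String × String)) : List (String × Bool) :=
  match PySem.Dict.get? (PySem.Dict.mk project_info) "deliverables" with
  | none => []   -- Python raises KeyError here; excluded by Pre_
  | some dv =>
      let s := PySem.Str.lower dv
      [("pipeline", PySem.Str.isIn "pipeline" s), ("cbioportal", PySem.Str.isIn "cbioportal" s)]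

-- ===== PRECONDITION & SPEC =====
-- Pre_ excludes exactly the inputs without a "deliverables" key, on which Python A raises KeyError.
def Pre_identify_deliverables (project_info : List (String × String)) : Prop :=
  (PySem.Dict.get? (PySem.Dict.mk project_info) "deliverables").isSome = true
instance (project_info : List (String × String)) : Decidable (Pre_identify_deliverables project_info) := by unfold Pre_identify_deliverables; infer_instance
def pvWitness_identify_deliverables : (List (String × String)) := [("deliverables", "Pipeline, cbioPortal data")]

def Spec_identify_deliverables (project_info : List (String × String)) (out : List (String × Bool)) : Prop := out = identify_deliverables_alt project_info
instance (project_info : List (String × String)) (out : List (String × Bool)) : Decidable (Spec_identify_deliverables project_info out) := by unfold Spec_identify_deliverables; infer_instance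

-- ===== CLAIM (what is proved, stated in full; the proofs are below) =====
def Claim_equal_identify_deliverables : Prop := ∀ (project_info : List (String × String)), Dom_identify_deliverables project_info → Pre_identify_deliverables project_info → Spec_identify_deliverables project_info (identify_deliverables project_info)

-- ===== LEMMAS AND PROOFS =====

-- lowering a character cannot create or destroy a comma
theorem pv_lowerChar_comma (x : Char) : (PySem.Chars.lowerChar x == ',') = (x == ',') := by
  unfold PySem.Chars.lowerChar PySem.Chars.isupper
  split_ifs with h
  · simp only [Bool.and_eq_true, decide_eq_true_eq, Char.le_def] at h
    have hv : x.val.toNat ≤ 90 := UInt32.le_iff_toNat_le.mp h.2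
    have hv2 : 65 ≤ x.val.toNat := UInt32.le_iff_toNat_le.mp h.1
    have hval : (x.toNat + 32).isValidChar := by
      left; show x.toNat + 32 < 0xD800; unfold Char.toNat; omega
    have hne : Char.ofNat (x.toNat + 32) ≠ ',' := by
      intro hcon
      have h2 : (Char.ofNat (x.toNat + 32)).toNat = 44 := by rw [hcon]; rfl
      rw [Char.toNat_ofNat, if_pos hval] at h2
      unfold Char.toNat at h2; omega
    have hne2 : x ≠ ',' := by
      intro hcon; subst hcon; exact absurd hv2 (by decide)
    simp [hne, hne2]
  · rfl


-- PySem's fuel-based single-char split agrees with Mathlib's List.splitOn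
theorem pv_go_spec (c : Char) (l : List Char) : ∀ (fuel : Nat) (cur : List Char) (acc : List (List Char)),
    l.length < fuel →
    PySem.Chars.splitOn.go [c] fuel l cur acc
      = acc.reverse ++ List.modifyHead (cur.reverse ++ ·) (List.splitOn c l) := by
  induction l with
  | nil =>
      intro fuel cur acc _
      cases fuel <;> simp [PySem.Chars.splitOn.go, List.splitOn, List.splitOnP_nil]
  | cons a rest ih =>
      intro fuel cur acc hf
      cases fuel with
      | zero => omega
      | succ fuel =>
        by_cases hca : c = a
        · subst hca
          have : PySem.Chars.splitOn.go [c] (fuel+1) (c :: rest) cur acc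
              = PySem.Chars.splitOn.go [c] fuel rest [] (cur.reverse :: acc) := by
            simp [PySem.Chars.splitOn.go]
          rw [this, ih fuel [] (cur.reverse :: acc) (by simpa using hf)]
          simp [List.splitOn, List.splitOnP_cons]
          exact congrFun List.modifyHead_id _
        · have hne : (c == a) = false := by simp [hca]
          have : PySem.Chars.splitOn.go [c] (fuel+1) (a :: rest) cur acc
              = PySem.Chars.splitOn.go [c] fuel rest (a :: cur) acc := by
            simp [PySem.Chars.splitOn.go, List.isPrefixOf, hne]
          rw [this, ih fuel (a :: cur) acc (by simpa using hf)]
          have hne2 : (a == c) = false := by simp [Ne.symm hca]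
          simp [List.splitOn, List.splitOnP_cons, hne2, List.modifyHead_modifyHead]
          congr 1

theorem pv_splitOn_eq (c : Char) (cs : List Char) :
    PySem.Chars.splitOn cs [c] = List.splitOn c cs := by
  unfold PySem.Chars.splitOn
  rw [pv_go_spec c cs (cs.length + 1) [] [] (by omega)]
  simp
  exact congrFun List.modifyHead_id _

theorem pv_splitOnP_map (f : Char → Char) (h : ∀ x, (f x == ',') = (x == ',')) (l : List Char) :
    List.splitOnP (· == ',') (l.map f) = (List.splitOnP (· == ',') l).map (List.map f) := by
  induction l with
  | nil => simp [List.splitOnP_nil]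
  | cons a l ih =>
      simp only [List.map_cons, List.splitOnP_cons, h a]
      by_cases ha : (a == ',') = true
      · simp [ha, ih]
      · simp only [Bool.not_eq_true] at ha
        simp only [ha, Bool.false_eq_true, if_false, ih]
        cases hL : List.splitOnP (· == ',') l with
        | nil => exact absurd hL (List.splitOnP_ne_nil _ _)
        | cons hd tl => simp

theorem pv_lower_splitOn (cs : List Char) :
    List.splitOn ',' (PySem.Chars.lower cs) = (List.splitOn ',' cs).map PySem.Chars.lower := by
  unfold List.splitOn PySem.Chars.lower
  exact pv_splitOnP_map _ pv_lowerChar_comma cs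

theorem pv_headI_mem {α : Type} [Inhabited α] {l : List α} (h : l ≠ []) : l.headI ∈ l := by
  cases l with
  | nil => exact absurd rfl h
  | cons a t => exact List.mem_cons_self

theorem pv_head_splitOn_prefix : ∀ cs : List Char, (List.splitOn ',' cs).headI <+: cs := by
  intro cs
  induction cs with
  | nil => simp [List.splitOn, List.splitOnP_nil]
  | cons a rest ih =>
      by_cases ha : a = ','
      · subst ha; simp [List.splitOn, List.splitOnP_cons]
      · have hb : (a == ',') = false := by simp [ha]
        simp only [List.splitOn, List.splitOnP_cons, hb, Bool.false_eq_true, if_false]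
        cases hL : List.splitOnP (· == ',') rest with
        | nil => exact absurd hL (List.splitOnP_ne_nil _ _)
        | cons hd tl =>
            simp only [List.modifyHead, List.headI]
            have : hd <+: rest := by rw [List.splitOn, hL] at ih; simpa using ih
            exact (List.cons_prefix_cons).mpr ⟨rfl, this⟩

theorem pv_token_infix : ∀ (cs : List Char) (t : List Char), t ∈ List.splitOn ',' cs → t <:+: cs := by
  intro cs
  induction cs with
  | nil => intro t ht; simp [List.splitOn, List.splitOnP_nil] at ht; simp [ht]
  | cons a rest ih =>
      intro t ht
      by_cases ha : a = ','
      · subst ha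
        simp only [List.splitOn, List.splitOnP_cons, beq_self_eq_true, if_true] at ht
        rcases List.mem_cons.mp ht with h | h
        · simp [h]
        · exact List.infix_cons (ih t h)
      · have hb : (a == ',') = false := by simp [ha]
        simp only [List.splitOn, List.splitOnP_cons, hb, Bool.false_eq_true, if_false] at ht
        cases hL : List.splitOnP (· == ',') rest with
        | nil => exact absurd hL (List.splitOnP_ne_nil _ _)
        | cons hd tl =>
            rw [hL] at ht
            simp only [List.modifyHead] at ht
            rcases List.mem_cons.mp ht with h | h
            · subst h
              have : hd <+: rest := by
                have := pv_head_splitOn_prefix rest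
                rw [List.splitOn, hL] at this; simpa using this
              exact ((List.cons_prefix_cons).mpr ⟨rfl, this⟩).isInfix
            · exact List.infix_cons (ih t (by rw [List.splitOn, hL]; exact List.mem_cons_of_mem _ h))

theorem pv_head_prefix (p : List Char) : ∀ cs : List Char, ',' ∉ p → p <+: cs → p <+: (List.splitOn ',' cs).headI := by
  induction p with
  | nil => intro cs _ _; exact List.nil_prefix
  | cons x p' ih =>
      intro cs hc hpre
      cases cs with
      | nil => simp at hpre
      | cons b cs' =>
          obtain ⟨hxb, hp'⟩ := List.cons_prefix_cons.mp hpre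
          subst hxb
          have hx : x ≠ ',' := by intro h; exact hc (h ▸ List.mem_cons_self)
          have hb : (x == ',') = false := by simp [hx]
          simp only [List.splitOn, List.splitOnP_cons, hb, Bool.false_eq_true, if_false]
          cases hL : List.splitOnP (· == ',') cs' with
          | nil => exact absurd hL (List.splitOnP_ne_nil _ _)
          | cons hd tl =>
              simp only [List.modifyHead, List.headI]
              have hih := ih cs' (fun h => hc (List.mem_cons_of_mem _ h)) hp'
              rw [List.splitOn, hL] at hih
              exact (List.cons_prefix_cons).mpr ⟨rfl, by simpa using hih⟩

theorem pv_infix_to_token (p : List Char) (hp : ',' ∉ p) : ∀ cs : List Char,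
    p <:+: cs → ∃ t ∈ List.splitOn ',' cs, p <:+: t := by
  intro cs
  induction cs with
  | nil =>
      intro h
      exact ⟨[], by simp [List.splitOn, List.splitOnP_nil], by rw [List.eq_nil_of_infix_nil h]⟩
  | cons a rest ih =>
      intro h
      by_cases hpn : p = []
      · subst hpn
        exact ⟨(List.splitOn ',' (a :: rest)).headI,
          pv_headI_mem (by simp only [List.splitOn]; exact List.splitOnP_ne_nil _ _), List.nil_infix⟩
      · rcases List.infix_cons_iff.mp h with hpre | hinf
        · exact ⟨(List.splitOn ',' (a :: rest)).headI,
            pv_headI_mem (by simp only [List.splitOn]; exact List.splitOnP_ne_nil _ _),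
            (pv_head_prefix p _ hp hpre).isInfix⟩
        · obtain ⟨t, ht, hinf'⟩ := ih hinf
          by_cases ha : a = ','
          · subst ha
            refine ⟨t, ?_, hinf'⟩
            simp only [List.splitOn, List.splitOnP_cons, beq_self_eq_true, if_true]
            exact List.mem_cons_of_mem _ (by simpa [List.splitOn] using ht)
          · have hb : (a == ',') = false := by simp [ha]
            rw [List.splitOn] at ht ⊢
            simp only [List.splitOnP_cons, hb, Bool.false_eq_true, if_false]
            cases hL : List.splitOnP (· == ',') rest with
            | nil => exact absurd hL (List.splitOnP_ne_nil _ _)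
            | cons hd tl =>
                rw [hL] at ht
                rcases List.mem_cons.mp ht with hth | htt
                · subst hth
                  exact ⟨a :: t, by simp [List.modifyHead], List.infix_cons hinf'⟩
                · exact ⟨t, by simp only [List.modifyHead]; exact List.mem_cons_of_mem _ htt, hinf'⟩

theorem pv_any_isIn (p : List Char) (hp : ',' ∉ p) (cs : List Char) :
    ((List.splitOn ',' cs).any (fun t => PySem.Chars.isIn p t)) = PySem.Chars.isIn p cs := by
  rw [Bool.eq_iff_iff]
  simp only [List.any_eq_true, PySem.Chars.isIn_iff_infix]
  constructor
  · rintro ⟨t, ht, hinf⟩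
    exact hinf.trans (pv_token_infix cs t ht)
  · exact pv_infix_to_token p hp cs

theorem pv_ins_p (b1 b2 : Bool) :
    PySem.Dict.insert (PySem.Dict.mk [("pipeline", b1), ("cbioportal", b2)]) "pipeline" true
      = PySem.Dict.mk [("pipeline", true), ("cbioportal", b2)] := by
  simp [PySem.Dict.insert, PySem.Dict.contains]
theorem pv_ins_c (b1 b2 : Bool) :
    PySem.Dict.insert (PySem.Dict.mk [("pipeline", b1), ("cbioportal", b2)]) "cbioportal" true
      = PySem.Dict.mk [("pipeline", b1), ("cbioportal", true)] := by
  simp [PySem.Dict.insert, PySem.Dict.contains]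
theorem pv_loop (ts : List String) : ∀ b1 b2 : Bool,
    ts.foldl (fun (D : PySem.Dict String Bool) i =>
        let D := if PySem.Str.isIn "pipeline" (PySem.Str.lower i) then PySem.Dict.insert D "pipeline" true else D
        let D := if PySem.Str.isIn "cbioportal" (PySem.Str.lower i) then PySem.Dict.insert D "cbioportal" true else D
        D) (PySem.Dict.mk [("pipeline", b1), ("cbioportal", b2)])
    = PySem.Dict.mk [("pipeline", b1 || ts.any fun t => PySem.Str.isIn "pipeline" (PySem.Str.lower t)),
                     ("cbioportal", b2 || ts.any fun t => PySem.Str.isIn "cbioportal" (PySem.Str.lower t))] := by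
  induction ts with
  | nil => intro b1 b2; simp
  | cons t ts ih =>
      intro b1 b2
      rw [List.foldl_cons]
      show List.foldl _ (let D := if PySem.Str.isIn "pipeline" (PySem.Str.lower t) then PySem.Dict.insert (PySem.Dict.mk [("pipeline", b1), ("cbioportal", b2)]) "pipeline" true else PySem.Dict.mk [("pipeline", b1), ("cbioportal", b2)];
                         let D := if PySem.Str.isIn "cbioportal" (PySem.Str.lower t) then PySem.Dict.insert D "cbioportal" true else D; D) ts = _
      by_cases h1 : PySem.Str.isIn "pipeline" (PySem.Str.lower t) <;>
        by_cases h2 : PySem.Str.isIn "cbioportal" (PySem.Str.lower t) <;>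
          simp only [h1, h2, if_true, if_false, Bool.false_eq_true, pv_ins_p, pv_ins_c, ih,
            List.any_cons, Bool.true_or, Bool.false_or, Bool.or_true]

-- the per-token membership test over the comma-split equals one whole-string test, word-wise
theorem pv_key (w : String) (hw : ',' ∉ w.toList) (dv : String) :
    ((PySem.Chars.splitOn dv.toList [',']).map String.ofList).any
        (fun t => PySem.Str.isIn w (PySem.Str.lower t))
      = PySem.Str.isIn w (PySem.Str.lower dv) := by
  rw [List.any_map]
  have hcomp : ((fun t => PySem.Str.isIn w (PySem.Str.lower t)) ∘ String.ofList)
      = fun t => PySem.Chars.isIn w.toList (PySem.Chars.lower t) := by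
    funext t
    simp [Function.comp, PySem.Str.isIn, PySem.Str.lower]
  rw [hcomp, pv_splitOn_eq]
  have h2 : (List.splitOn ',' dv.toList).any (fun t => PySem.Chars.isIn w.toList (PySem.Chars.lower t))
      = (List.splitOn ',' (PySem.Chars.lower dv.toList)).any (fun t => PySem.Chars.isIn w.toList t) := by
    rw [pv_lower_splitOn, List.any_map]; rfl
  rw [h2, pv_any_isIn w.toList hw]
  simp [PySem.Str.isIn, PySem.Str.lower]

-- ===== VERDICT (by name: the statement is the Claim_ definition above) =====
theorem identify_deliverables_spec : Claim_equal_identify_deliverables := by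
  intro project_info _ hpre
  unfold Spec_identify_deliverables identify_deliverables identify_deliverables_alt
  cases hget : PySem.Dict.get? (PySem.Dict.mk project_info) "deliverables" with
  | none => rfl
  | some dv =>
      show PySem.Dict.items (List.foldl _ (PySem.Dict.mk [("pipeline", false), ("cbioportal", false)]) ((PySem.Str.split? dv ",").getD [])) = _
      have hsplit : (PySem.Str.split? dv ",").getD []
          = (PySem.Chars.splitOn dv.toList [',']).map String.ofList := by
        simp [PySem.Str.split?, PySem.Chars.split?]
      rw [hsplit, pv_loop]
      simp only [Bool.false_or]
      rw [pv_key "pipeline" (by decide) dv, pv_key "cbioportal" (by decide) dv]
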